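-- pv_equiv track=rewrite | github.com/jonathanMLDev/cppa-unified-dashboard_01 | BoostDepth/statistics/merge_module_optimizer.py | _count_shared_relations
-- ===== SOURCE A (Python) =====
-- from typing import Dict, List, Tuple
--
-- def _count_shared_relations(
--                             relation_dict: Dict[str, Dict[str, int]],
--                             module1: str,
--                             module2: str,
--                             target_value: int) -> int:
--     """
--     Count shared relations between two modules for a specific relation value.
--
--     Args:
--         relation_dict: The relation dictionary (module_relation)
--         module1: First module name
--         module2: Second module name
--         target_value: The relation value to count (1 for Primary, -1 for Reverse)
--
--     Returns:
--         Count of shared relations with the target value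
--     """
--     relations1 = {name for name, val in relation_dict.get(module1, {}).items() if val == target_value}
--     relations2 = {name for name, val in relation_dict.get(module2, {}).items() if val == target_value}
--     return len(relations1 & relations2)
-- ===== SOURCE B (Python) =====
-- from typing import Dict
--
-- def _count_shared_relations(
--                             relation_dict: Dict[str, Dict[str, int]],
--                             module1: str,
--                             module2: str,
--                             target_value: int) -> int:
--     """Single pass over module1's relations, counting direct hits in module2's dict."""
--     r2 = relation_dict.get(module2, {})
--     count = 0
--     for name, val in relation_dict.get(module1, {}).items():
--         if val == target_value and r2.get(name) == target_value:
--             count += 1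
--     return count
-- ===== Notes on version B (the rewrite author's own statement) =====
-- stated objective: simpler
-- what changed: Replaces the two set comprehensions and the set intersection with one accumulating loop over module1's relations that checks module2's dict directly and maintains only a counter.
import Mathlib
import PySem

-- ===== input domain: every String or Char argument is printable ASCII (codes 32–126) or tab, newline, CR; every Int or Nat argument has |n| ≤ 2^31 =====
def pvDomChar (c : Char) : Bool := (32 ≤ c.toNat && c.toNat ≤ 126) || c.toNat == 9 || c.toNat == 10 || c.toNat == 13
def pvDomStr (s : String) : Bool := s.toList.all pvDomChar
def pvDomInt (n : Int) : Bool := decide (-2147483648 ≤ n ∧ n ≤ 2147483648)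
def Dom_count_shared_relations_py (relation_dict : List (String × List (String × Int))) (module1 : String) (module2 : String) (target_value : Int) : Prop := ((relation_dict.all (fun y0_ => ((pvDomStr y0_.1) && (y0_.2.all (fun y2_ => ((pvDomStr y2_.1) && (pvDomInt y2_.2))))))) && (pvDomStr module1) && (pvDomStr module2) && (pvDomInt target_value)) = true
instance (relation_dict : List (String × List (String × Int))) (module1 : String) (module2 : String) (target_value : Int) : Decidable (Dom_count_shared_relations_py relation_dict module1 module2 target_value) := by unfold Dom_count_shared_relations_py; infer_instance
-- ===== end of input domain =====

-- B replaces A's two set comprehensions + intersection by a single counting loop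
-- over module1's relations with direct lookups into module2's dict (objective: simpler).

-- ===== PORT A =====
def count_shared_relations_py (relation_dict : List (String × List (String × Int))) (module1 : String) (module2 : String) (target_value : Int) : Int :=
  -- relations1 = {name for name, val in relation_dict.get(module1, {}).items() if val == target_value}
  let relations1 : PySem.Set String :=
    PySem.Set.ofList ((((PySem.Dict.mk relation_dict).getD module1 []).filter
      (fun p => p.2 == target_value)).map (fun p => p.1))
  -- relations2 = {name for name, val in relation_dict.get(module2, {}).items() if val == target_value}
  let relations2 : PySem.Set String :=
    PySem.Set.ofList ((((PySem.Dict.mk relation_dict).getD module2 []).filter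
      (fun p => p.2 == target_value)).map (fun p => p.1))
  -- return len(relations1 & relations2)
  PySem.Set.len (PySem.Set.inter relations1 relations2)

-- ===== PORT B =====
def count_shared_relations_py_alt (relation_dict : List (String × List (String × Int))) (module1 : String) (module2 : String) (target_value : Int) : Int :=
  -- r2 = relation_dict.get(module2, {})
  let r2 : PySem.Dict String Int := PySem.Dict.mk ((PySem.Dict.mk relation_dict).getD module2 [])
  -- for name, val in relation_dict.get(module1, {}).items(): if …: count += 1
  ((PySem.Dict.mk relation_dict).getD module1 []).foldl
    (fun count p =>
      if p.2 == target_value && (r2.get? p.1 == some target_value) then count + 1 else count)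
    0

-- ===== PRECONDITION & SPEC =====
-- Pre_ requires every inner association list to have distinct keys, as the inner
-- Python dicts always do; it excludes no input representable as A's Python argument.
def Pre_count_shared_relations_py (relation_dict : List (String × List (String × Int))) (module1 : String) (module2 : String) (target_value : Int) : Prop :=
  ∀ p ∈ relation_dict, (p.2.map Prod.fst).Nodup
instance (relation_dict : List (String × List (String × Int))) (module1 : String) (module2 : String) (target_value : Int) : Decidable (Pre_count_shared_relations_py relation_dict module1 module2 target_value) := by unfold Pre_count_shared_relations_py; infer_instance

def pvWitness_count_shared_relations_py : (List (String × List (String × Int))) × String × String × Int :=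
  ([("a", [("x", 1), ("y", -1)]), ("b", [("x", 1)])], "a", "b", 1)

def Spec_count_shared_relations_py (relation_dict : List (String × List (String × Int))) (module1 : String) (module2 : String) (target_value : Int) (out : Int) : Prop := out = count_shared_relations_py_alt relation_dict module1 module2 target_value
instance (relation_dict : List (String × List (String × Int))) (module1 : String) (module2 : String) (target_value : Int) (out : Int) : Decidable (Spec_count_shared_relations_py relation_dict module1 module2 target_value out) := by unfold Spec_count_shared_relations_py; infer_instance

-- ===== CLAIM (what is proved, stated in full; the proofs are below) =====
def Claim_equal_count_shared_relations_py : Prop := ∀ (relation_dict : List (String × List (String × Int))) (module1 : String) (module2 : String) (target_value : Int), Dom_count_shared_relations_py relation_dict module1 module2 target_value → Pre_count_shared_relations_py relation_dict module1 module2 target_value → Spec_count_shared_relations_py relation_dict module1 module2 target_value (count_shared_relations_py relation_dict module1 module2 target_value)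

-- ===== LEMMAS AND PROOFS =====

-- the counting loop is countP
theorem pv_foldl_count {α : Type} (P : α → Bool) (l : List α) (c : Int) :
    l.foldl (fun count p => if P p then count + 1 else count) c = c + l.countP P := by
  induction l generalizing c with
  | nil => simp
  | cons a l ih =>
    simp only [List.foldl_cons, List.countP_cons, ih]
    by_cases h : P a
    · simp [h]; ring
    · simp [h]

-- the first-match lookup with default [] yields [] or an inner list of relation_dict
theorem pv_getD_mem (l : List (String × List (String × Int))) (k : String) :
    (PySem.Dict.mk l).getD k [] = [] ∨ (k, (PySem.Dict.mk l).getD k []) ∈ l := by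
  induction l with
  | nil => left; rfl
  | cons p l ih =>
    obtain ⟨k', v⟩ := p
    rw [PySem.Dict.getD, PySem.Dict.get?_mk_cons]
    by_cases h : k' == k
    · rw [if_pos h]
      right
      have hk : k' = k := by simpa using h
      subst hk
      simp
    · rw [if_neg h]
      rcases ih with h' | h'
      · left; simpa [PySem.Dict.getD] using h'
      · right; right; simpa [PySem.Dict.getD] using h'

-- dict lookup in r2 equals membership of (name, t), given distinct keys
theorem pv_get?_iff (r2 : List (String × Int)) (x : String) (t : Int)
    (h2 : (r2.map Prod.fst).Nodup) :
    (PySem.Dict.mk r2).get? x = some t ↔ (x, t) ∈ r2 := by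
  have hk : (PySem.Dict.mk r2).keys.Nodup := by simpa [PySem.Dict.keys_mk] using h2
  simpa using PySem.Dict.get?_eq_some_iff_mem_items (PySem.Dict.mk r2) x t hk

-- core: A's set intersection length = B's counting loop, for inner dicts with distinct keys
theorem pv_main (r1 r2 : List (String × Int)) (t : Int)
    (h1 : (r1.map Prod.fst).Nodup) (h2 : (r2.map Prod.fst).Nodup) :
    PySem.Set.len (PySem.Set.inter
        (PySem.Set.ofList ((r1.filter (fun p => p.2 == t)).map (fun p => p.1)))
        (PySem.Set.ofList ((r2.filter (fun p => p.2 == t)).map (fun p => p.1))))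
      = r1.foldl (fun count p =>
          if p.2 == t && ((PySem.Dict.mk r2).get? p.1 == some t) then count + 1 else count) 0 := by
  rw [pv_foldl_count, Int.zero_add]
  set N2 : List String := (r2.filter (fun p => p.2 == t)).map (fun p => p.1) with hN2
  have hnd1 : ((r1.filter (fun p => p.2 == t)).map (fun p => p.1)).Nodup := by
    exact List.Nodup.sublist (List.Sublist.map _ List.filter_sublist) h1
  have hmemN2 : ∀ x : String, x ∈ N2 ↔ (x, t) ∈ r2 := by
    intro x
    simp only [hN2, List.mem_map, List.mem_filter]
    constructor
    · rintro ⟨q, ⟨hq, hqt⟩, rfl⟩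
      have : q.2 = t := by simpa using hqt
      simpa [← this] using hq
    · intro h
      exact ⟨(x, t), ⟨h, by simp⟩, rfl⟩
  rw [PySem.Set.ofList_eq_self_of_nodup _ hnd1]
  have hb : ∀ p : String × Int,
      ((PySem.Set.ofList N2).contains p.1) = ((PySem.Dict.mk r2).get? p.1 == some t) := by
    intro p
    rw [Bool.eq_iff_iff]
    simp only [PySem.Set.contains_iff, PySem.Set.mem_ofList, hmemN2, beq_iff_eq]
    exact (pv_get?_iff r2 p.1 t h2).symm
  simp only [PySem.Set.len, PySem.Set.inter]
  congr 1
  rw [← List.countP_eq_length_filter, List.countP_map, List.countP_filter]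
  apply List.countP_congr
  intro p _
  simp only [Function.comp_apply, hb p, Bool.and_comm]

theorem count_shared_relations_py_spec : Claim_equal_count_shared_relations_py := by
  intro relation_dict module1 module2 target_value _ hpre
  unfold Spec_count_shared_relations_py count_shared_relations_py count_shared_relations_py_alt
  have hr : ∀ m : String, (((PySem.Dict.mk relation_dict).getD m []).map Prod.fst).Nodup := by
    intro m
    rcases pv_getD_mem relation_dict m with h | h
    · simp [h]
    · exact hpre _ h
  exact pv_main _ _ target_value (hr module1) (hr module2)
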